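-- pv_equiv track=rewrite | github.com/openlandmap/scikit-map | 02-ard2-overlay.py | _raster_files
-- ===== SOURCE A (Python) =====
-- def _raster_files(tile, bands = ['blue', 'green', 'red', 'nir', 'swir1', 'swir2', 'thermal'], base_url='http://192.168.49.30:8333'):
--   result = []
--
--   itile = int.from_bytes(tile.encode(), 'little')
--   base_url = base_url.replace('192.168.49.30', f'192.168.49.{30 + itile % 13}')
--
--   for band in bands:
--     result += [
--       f'{base_url}/prod-landsat-ard2/{tile}/seasconv/{band}_glad.SeasConv.ard2_m_30m_s_' + '{year}0101_{year}0228_go_epsg.4326_v20230908.tif',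
--       f'{base_url}/prod-landsat-ard2/{tile}/seasconv/{band}_glad.SeasConv.ard2_m_30m_s_' + '{year}0301_{year}0430_go_epsg.4326_v20230908.tif',
--       f'{base_url}/prod-landsat-ard2/{tile}/seasconv/{band}_glad.SeasConv.ard2_m_30m_s_' + '{year}0501_{year}0630_go_epsg.4326_v20230908.tif',
--       f'{base_url}/prod-landsat-ard2/{tile}/seasconv/{band}_glad.SeasConv.ard2_m_30m_s_' + '{year}0701_{year}0831_go_epsg.4326_v20230908.tif',
--       f'{base_url}/prod-landsat-ard2/{tile}/seasconv/{band}_glad.SeasConv.ard2_m_30m_s_' + '{year}0901_{year}1031_go_epsg.4326_v20230908.tif',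
--       f'{base_url}/prod-landsat-ard2/{tile}/seasconv/{band}_glad.SeasConv.ard2_m_30m_s_' + '{year}1101_{year}1231_go_epsg.4326_v20230908.tif'
--     ]
--
--   return result
-- ===== SOURCE B (Python) =====
-- def _raster_files(tile, bands = ['blue', 'green', 'red', 'nir', 'swir1', 'swir2', 'thermal'], base_url='http://192.168.49.30:8333'):
--   itile = int.from_bytes(tile.encode(), 'little')
--   base_url = base_url.replace('192.168.49.30', f'192.168.49.{30 + itile % 13}')
--
--   # Month lengths; each two-month season starts on the 1st of an odd month m and
--   # ends on the last day of month m+1, so the date strings are computed from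
--   # calendar arithmetic instead of being pasted as literals.
--   days = [31, 28, 31, 30, 31, 30, 31, 31, 30, 31, 30, 31]
--
--   def urls(bs):
--     if not bs:
--       return []
--     return ['%s/prod-landsat-ard2/%s/seasconv/%s_glad.SeasConv.ard2_m_30m_s_{year}%02d01_{year}%02d%02d_go_epsg.4326_v20230908.tif'
--             % (base_url, tile, bs[0], m, m + 1, days[m]) for m in range(1, 12, 2)] + urls(bs[1:])
--
--   return urls(bands)
-- ===== Notes on version B (the rewrite author's own statement) =====
-- stated objective: alternative
-- what changed: B derives the six season date strings from calendar arithmetic (odd start month, end = next month with its length from a month-length table, %02d formatting) instead of six pasted URL literals, and builds the band-major list by structural recursion on the band list instead of an accumulating loop.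
import Mathlib
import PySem

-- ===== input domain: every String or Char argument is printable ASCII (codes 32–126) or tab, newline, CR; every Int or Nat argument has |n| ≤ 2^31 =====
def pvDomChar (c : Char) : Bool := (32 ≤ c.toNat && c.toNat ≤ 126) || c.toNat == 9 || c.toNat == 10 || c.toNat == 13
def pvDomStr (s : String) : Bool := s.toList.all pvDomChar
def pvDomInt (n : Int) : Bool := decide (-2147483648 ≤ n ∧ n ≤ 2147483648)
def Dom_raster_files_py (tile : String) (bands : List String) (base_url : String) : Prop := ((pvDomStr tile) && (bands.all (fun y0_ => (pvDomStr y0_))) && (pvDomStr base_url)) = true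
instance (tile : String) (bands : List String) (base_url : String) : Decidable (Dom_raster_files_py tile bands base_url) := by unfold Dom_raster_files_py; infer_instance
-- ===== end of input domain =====

-- B derives the six season date strings from calendar arithmetic (month-length table,
-- %02d formatting) instead of pasted literals, and builds the band-major list by
-- structural recursion on the band list instead of an accumulating loop (objective: alternative).


-- ===== PORT A =====
-- int.from_bytes(tile.encode(), 'little'): the UTF-8 bytes of tile (= the char codes on
-- the ASCII domain), least-significant first, i.e. Horner over the reversed char list.
-- Ported by hand, exact on the ASCII domain.
def raster_files_py (tile : String) (bands : List String) (base_url : String) : List String :=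
  let itile : Nat := tile.toList.reverse.foldl (fun a c => a * 256 + c.toNat) 0
  let base_url' : String := PySem.Str.replace base_url "192.168.49.30"
      ("192.168.49." ++ PySem.Int.toStr (30 + PySem.Int.mod (itile : Int) 13))
  bands.foldl (fun result band =>
    result ++
      [ base_url' ++ "/prod-landsat-ard2/" ++ tile ++ "/seasconv/" ++ band ++ "_glad.SeasConv.ard2_m_30m_s_" ++ "{year}0101_{year}0228_go_epsg.4326_v20230908.tif",
        base_url' ++ "/prod-landsat-ard2/" ++ tile ++ "/seasconv/" ++ band ++ "_glad.SeasConv.ard2_m_30m_s_" ++ "{year}0301_{year}0430_go_epsg.4326_v20230908.tif",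
        base_url' ++ "/prod-landsat-ard2/" ++ tile ++ "/seasconv/" ++ band ++ "_glad.SeasConv.ard2_m_30m_s_" ++ "{year}0501_{year}0630_go_epsg.4326_v20230908.tif",
        base_url' ++ "/prod-landsat-ard2/" ++ tile ++ "/seasconv/" ++ band ++ "_glad.SeasConv.ard2_m_30m_s_" ++ "{year}0701_{year}0831_go_epsg.4326_v20230908.tif",
        base_url' ++ "/prod-landsat-ard2/" ++ tile ++ "/seasconv/" ++ band ++ "_glad.SeasConv.ard2_m_30m_s_" ++ "{year}0901_{year}1031_go_epsg.4326_v20230908.tif",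
        base_url' ++ "/prod-landsat-ard2/" ++ tile ++ "/seasconv/" ++ band ++ "_glad.SeasConv.ard2_m_30m_s_" ++ "{year}1101_{year}1231_go_epsg.4326_v20230908.tif" ]) []

-- ===== PORT B =====
-- Python '%02d' % n for 0 ≤ n < 100 (all uses are months/days): pad to two digits.
def pvFmt2 (n : Int) : String := if n < 10 then "0" ++ PySem.Int.toStr n else PySem.Int.toStr n

-- Source B's month-length table; days[m] never raises (m ∈ range(1,12,2)), .getD 0 is unreachable.
def pvDays : List Int := [31, 28, 31, 30, 31, 30, 31, 31, 30, 31, 30, 31]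

-- Source B's recursive helper 'urls': one comprehension over range(1,12,2) per band,
-- the season segment computed from m, m+1 and days[m], then recurse on the tail.
def pvUrls (base_url tile : String) : List String → List String
  | [] => []
  | band :: rest =>
    ((PySem.List.pyRange 1 12 2).map (fun m =>
      (base_url ++ "/prod-landsat-ard2/" ++ tile ++ "/seasconv/" ++ band ++ "_glad.SeasConv.ard2_m_30m_s_") ++
      ("{year}" ++ pvFmt2 m ++ "01_{year}" ++ pvFmt2 (m + 1) ++ pvFmt2 ((PySem.List.pyGet? pvDays m).getD 0) ++ "_go_epsg.4326_v20230908.tif")))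
    ++ pvUrls base_url tile rest

def raster_files_py_alt (tile : String) (bands : List String) (base_url : String) : List String :=
  let itile : Nat := tile.toList.reverse.foldl (fun a c => a * 256 + c.toNat) 0
  let base_url' : String := PySem.Str.replace base_url "192.168.49.30"
      ("192.168.49." ++ PySem.Int.toStr (30 + PySem.Int.mod (itile : Int) 13))
  pvUrls base_url' tile bands

-- ===== PRECONDITION & SPEC =====
def Spec_raster_files_py (tile : String) (bands : List String) (base_url : String) (out : List String) : Prop := out = raster_files_py_alt tile bands base_url
instance (tile : String) (bands : List String) (base_url : String) (out : List String) : Decidable (Spec_raster_files_py tile bands base_url out) := by unfold Spec_raster_files_py; infer_instance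

-- ===== CLAIM (what is proved, stated in full; the proofs are below) =====
def Claim_equal_raster_files_py : Prop := ∀ (tile : String) (bands : List String) (base_url : String), Dom_raster_files_py tile bands base_url → Spec_raster_files_py tile bands base_url (raster_files_py tile bands base_url)

-- ===== LEMMAS AND PROOFS =====

-- Each computed season segment evaluates to the corresponding literal of A,
-- so B's per-band comprehension is exactly A's six-element block.
theorem pv_block_eq (P : String) :
    ((PySem.List.pyRange 1 12 2).map (fun m =>
      P ++ ("{year}" ++ pvFmt2 m ++ "01_{year}" ++ pvFmt2 (m + 1) ++ pvFmt2 ((PySem.List.pyGet? pvDays m).getD 0) ++ "_go_epsg.4326_v20230908.tif")))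
    = [ P ++ "{year}0101_{year}0228_go_epsg.4326_v20230908.tif",
        P ++ "{year}0301_{year}0430_go_epsg.4326_v20230908.tif",
        P ++ "{year}0501_{year}0630_go_epsg.4326_v20230908.tif",
        P ++ "{year}0701_{year}0831_go_epsg.4326_v20230908.tif",
        P ++ "{year}0901_{year}1031_go_epsg.4326_v20230908.tif",
        P ++ "{year}1101_{year}1231_go_epsg.4326_v20230908.tif" ] := by
  have hr : PySem.List.pyRange 1 12 2 = [1, 3, 5, 7, 9, 11] := by decide
  rw [hr]
  simp only [List.map_cons, List.map_nil, List.cons.injEq, and_true]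
  exact ⟨congrArg (P ++ ·) (by decide), congrArg (P ++ ·) (by decide),
    congrArg (P ++ ·) (by decide), congrArg (P ++ ·) (by decide),
    congrArg (P ++ ·) (by decide), congrArg (P ++ ·) (by decide)⟩

-- ===== VERDICT (by name: the statement is the Claim_ definition above) =====
theorem raster_files_py_spec : Claim_equal_raster_files_py := by
  intro tile bands base_url hdom
  clear hdom
  unfold Spec_raster_files_py raster_files_py raster_files_py_alt
  simp only []
  set B := PySem.Str.replace base_url "192.168.49.30"
      ("192.168.49." ++ PySem.Int.toStr (30 + PySem.Int.mod
        ((tile.toList.reverse.foldl (fun a c => a * 256 + c.toNat) 0 : Nat) : Int) 13)) with hB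
  rw [PySem.List.foldl_append_eq_flatMap]
  rw [List.nil_append]
  induction bands with
  | nil => rfl
  | cons band rest ih =>
    rw [List.flatMap_cons, ih, pvUrls]
    rw [pv_block_eq (B ++ "/prod-landsat-ard2/" ++ tile ++ "/seasconv/" ++ band ++ "_glad.SeasConv.ard2_m_30m_s_")]
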